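-- pv_equiv track=rewrite | github.com/dreid1991/lcpoly | py/persistence_length.py | organizeData
-- ===== SOURCE A (Python) =====
-- import copy
--
-- def organizeData(inArray):
--     out = []
--     snap = []
--     for data in inArray:
--         if (len(data) == 1 and len(snap) != 0):
--             out.append(copy.deepcopy(snap))
--             snap = []
--         snap.append(copy.deepcopy(data))
--     return out
-- ===== SOURCE B (Python) =====
-- import copy
--
-- def organizeData(inArray):
--     # recursive split: cut at the first length-1 row past the head, recurse on the rest;
--     # the trailing segment (no further cut) is never emitted, matching A.
--     if not inArray:
--         return []
--     for i in range(1, len(inArray)):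
--         if len(inArray[i]) == 1:
--             return [copy.deepcopy(inArray[:i])] + organizeData(inArray[i:])
--     return []
-- ===== Notes on version B (the rewrite author's own statement) =====
-- stated objective: alternative
-- what changed: Replaces the incremental accumulate-and-flush loop over (out, snap) state with a recursive find-first-delimiter-then-slice decomposition that emits each segment as a slice and recurses on the remainder.
import Mathlib
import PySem

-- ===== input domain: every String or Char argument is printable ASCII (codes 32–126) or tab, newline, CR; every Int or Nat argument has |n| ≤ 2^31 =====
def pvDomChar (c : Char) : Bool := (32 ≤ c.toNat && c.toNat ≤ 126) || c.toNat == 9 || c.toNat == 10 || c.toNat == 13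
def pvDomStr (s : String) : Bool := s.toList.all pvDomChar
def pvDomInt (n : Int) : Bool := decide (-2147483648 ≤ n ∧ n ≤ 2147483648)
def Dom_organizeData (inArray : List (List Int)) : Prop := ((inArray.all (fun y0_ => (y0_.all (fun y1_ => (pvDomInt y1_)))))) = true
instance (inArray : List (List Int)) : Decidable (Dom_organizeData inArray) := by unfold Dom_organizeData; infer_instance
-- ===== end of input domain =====

-- B is an alternative decomposition (recursive split at the first delimiter) of A's accumulate-and-flush loop; same cost.

-- ===== PORT A =====
-- A's loop: state (out, snap); on a length-1 row with nonempty snap, flush snap; always append the row to snap.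
def organizeDataStep (s : List (List (List Int)) × List (List Int)) (data : List Int) :
    List (List (List Int)) × List (List Int) :=
  if data.length = 1 ∧ s.2 ≠ [] then (s.1 ++ [s.2], [data])
  else (s.1, s.2 ++ [data])

def organizeData (inArray : List (List Int)) : List (List (List Int)) :=
  (inArray.foldl organizeDataStep ([], [])).1

-- ===== PORT B =====
-- Source B's inner 'for i in range(1, len)' scan: carry the prefix already passed (inArray[:i])
-- and return (prefix, suffix from the first length-1 row) or none.
def splitFirst (pre : List (List Int)) : List (List Int) → Option (List (List Int) × List (List Int))
  | [] => none
  | d :: t => if d.length = 1 then some (pre, d :: t) else splitFirst (pre ++ [d]) t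

theorem splitFirst_len {pre p r} : ∀ {rest : List (List Int)},
    splitFirst pre rest = some (p, r) → r.length ≤ rest.length := by
  intro rest
  induction rest generalizing pre with
  | nil => simp [splitFirst]
  | cons d t ih =>
    simp only [splitFirst]
    split
    · intro h; cases h; simp
    · intro h; exact (ih h).trans (by simp)

def organizeData_alt : List (List Int) → List (List (List Int))
  | [] => []
  | h :: t =>
    match hs : splitFirst [h] t with
    | none => []
    | some (pre, rest) => pre :: organizeData_alt rest
termination_by xs => xs.length
decreasing_by
  have := splitFirst_len hs
  simp; omega

-- ===== PRECONDITION & SPEC =====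
def Spec_organizeData (inArray : List (List Int)) (out : List (List (List Int))) : Prop := out = organizeData_alt inArray
instance (inArray : List (List Int)) (out : List (List (List Int))) : Decidable (Spec_organizeData inArray out) := by unfold Spec_organizeData; infer_instance

-- ===== CLAIM (what is proved, stated in full; the proofs are below) =====
def Claim_equal_organizeData : Prop := ∀ (inArray : List (List Int)), Dom_organizeData inArray → Spec_organizeData inArray (organizeData inArray)

-- ===== LEMMAS AND PROOFS =====
-- B's computation continued from an in-progress segment `snap`.
def goAlt (snap rest : List (List Int)) : List (List (List Int)) :=
  match splitFirst snap rest with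
  | none => []
  | some (pre, r) => pre :: organizeData_alt r

theorem alt_cons (h : List Int) (t : List (List Int)) :
    organizeData_alt (h :: t) = goAlt [h] t := by
  rw [organizeData_alt, goAlt]
  rcases hs : splitFirst [h] t with _ | ⟨pre, rest⟩ <;> simp

theorem foldl_go (rest : List (List Int)) : ∀ (out : List (List (List Int)))
    (snap : List (List Int)), snap ≠ [] →
    (rest.foldl organizeDataStep (out, snap)).1 = out ++ goAlt snap rest := by
  induction rest with
  | nil => intro out snap _; simp [goAlt, splitFirst]
  | cons d t ih =>
    intro out snap hne
    by_cases hd : d.length = 1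
    · have : organizeDataStep (out, snap) d = (out ++ [snap], [d]) := by
        simp [organizeDataStep, hd, hne]
      rw [List.foldl_cons, this, ih _ [d] (by simp)]
      simp [goAlt, splitFirst, hd, alt_cons]
    · have : organizeDataStep (out, snap) d = (out, snap ++ [d]) := by
        simp [organizeDataStep, hd]
      rw [List.foldl_cons, this, ih _ (snap ++ [d]) (by simp)]
      simp [goAlt, splitFirst, hd]

-- ===== VERDICT (by name: the statement is the Claim_ definition above) =====
theorem organizeData_spec : Claim_equal_organizeData := by
  intro inArray _
  unfold Spec_organizeData organizeData
  cases inArray with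
  | nil => simp [organizeData_alt]
  | cons h t =>
    have hstep : organizeDataStep ([], []) h = ([], [h]) := by
      simp [organizeDataStep]
    rw [List.foldl_cons, hstep, foldl_go t [] [h] (by simp), alt_cons]
    simp
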